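-- pv_equiv track=rewrite | github.com/GrainedCube2214/Advent-Of-Code-2025 | Day 6/solution.py | worksheet_solver_part2
-- ===== SOURCE A (Python) =====
-- def worksheet_solver_part2(columns):
--     if not columns:
--         return 0
--
--     columns = columns[::-1]
--     results = []
--     stack = []
--
--     for column in columns:
--         temp_num = ''
--
--         for char in column:
--             if char.isdigit():
--                 temp_num += char
--             elif char in ['+', '*']:
--                 if temp_num:
--                     stack.append(int(temp_num))
--
--                 if stack:
--                     if char == '+':
--                         result = sum(stack)
--                     else:  # char == '*'
--                         result = 1
--                         for num in stack:
--                             result *= num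
--                     results.append(result)
--                     stack = []
--                 temp_num = ''
--
--         if temp_num:
--             stack.append(int(temp_num))
--
--     return sum(results)
-- ===== SOURCE B (Python) =====
-- def _tokenize_column(column):
--     toks = []
--     temp = ''
--     for ch in column:
--         if ch.isdigit():
--             temp += ch
--         elif ch in ('+', '*'):
--             if temp:
--                 toks.append(int(temp))
--             toks.append(ch)
--             temp = ''
--     if temp:
--         toks.append(int(temp))
--     return toks
--
--
-- def worksheet_solver_part2(columns):
--     if not columns:
--         return 0
--     # pass 1: tokenize reversed columns into a flat token stream
--     tokens = []
--     for column in reversed(columns):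
--         tokens += _tokenize_column(column)
--     # pass 2: evaluate the token stream with a stack and a running total
--     total = 0
--     stack = []
--     for tok in tokens:
--         if isinstance(tok, int):
--             stack.append(tok)
--         elif stack:
--             if tok == '+':
--                 total += sum(stack)
--             else:
--                 p = 1
--                 for v in stack:
--                     p *= v
--                 total += p
--             stack = []
--     return total
-- ===== Notes on version B (the rewrite author's own statement) =====
-- stated objective: alternative
-- what changed: A's single fused loop that parses characters and evaluates in place is split into a tokenizer pass producing a flat token stream (numbers and operators) over the reversed columns, and a separate stack evaluator pass over that stream keeping a running total instead of a results list.
import Mathlib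
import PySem

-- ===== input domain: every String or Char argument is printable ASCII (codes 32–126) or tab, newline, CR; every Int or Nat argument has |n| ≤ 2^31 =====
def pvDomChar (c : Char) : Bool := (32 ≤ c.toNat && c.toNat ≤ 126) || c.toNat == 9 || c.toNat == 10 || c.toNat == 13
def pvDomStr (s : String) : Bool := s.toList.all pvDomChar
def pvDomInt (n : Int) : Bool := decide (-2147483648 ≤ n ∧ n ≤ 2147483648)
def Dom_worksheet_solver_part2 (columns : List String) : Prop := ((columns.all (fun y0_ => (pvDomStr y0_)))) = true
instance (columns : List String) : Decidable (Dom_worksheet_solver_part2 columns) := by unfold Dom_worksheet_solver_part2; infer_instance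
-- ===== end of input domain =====

-- B separates A's fused per-character loop into a tokenizer pass (flat token stream over the
-- reversed columns) followed by a stack evaluator pass with a running total (objective: alternative).

-- int(temp) where temp is a nonempty digit run; the default 0 is unreachable there
def pvIntOf (cs : List Char) : Int := (PySem.Int.ofChars? cs).getD 0

-- ===== PORT A =====
-- inner character loop of A over one column, including the end-of-column flush of temp_num
def pvColA : List Char → List Int → List Int → List Char → (List Int × List Int)
  | [], results, stack, temp =>
      (results, if temp ≠ [] then stack ++ [pvIntOf temp] else stack)
  | ch :: rest, results, stack, temp =>
      if PySem.Chars.isdigit ch then pvColA rest results stack (temp ++ [ch])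
      else if ch = '+' ∨ ch = '*' then
        let stack1 := if temp ≠ [] then stack ++ [pvIntOf temp] else stack
        if stack1 = [] then pvColA rest results stack1 []
        else pvColA rest
          (results ++ [if ch = '+' then stack1.sum else stack1.foldl (· * ·) 1]) [] []
      else pvColA rest results stack temp

-- outer loop of A over the columns
def pvColsA : List String → List Int → List Int → List Int
  | [], results, _ => results
  | col :: rest, results, stack =>
      let rs := pvColA col.toList results stack []
      pvColsA rest rs.1 rs.2

def worksheet_solver_part2 (columns : List String) : Int :=
  if columns = [] then 0
  else (pvColsA columns.reverse [] []).sum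

-- ===== PORT B =====
inductive PvTok
  | num : Int → PvTok
  | op : Char → PvTok
deriving DecidableEq, Repr

-- B's tokenizer loop over one column (trailing flush is the [] case)
def pvTokChars : List Char → List Char → List PvTok
  | [], temp => if temp ≠ [] then [PvTok.num (pvIntOf temp)] else []
  | ch :: rest, temp =>
      if PySem.Chars.isdigit ch then pvTokChars rest (temp ++ [ch])
      else if ch = '+' ∨ ch = '*' then
        (if temp ≠ [] then [PvTok.num (pvIntOf temp)] else []) ++ [PvTok.op ch] ++ pvTokChars rest []
      else pvTokChars rest temp

def pvTokenizeCol (col : String) : List PvTok := pvTokChars col.toList []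

-- B's evaluator loop over the flat token stream
def pvEval : List PvTok → Int → List Int → Int
  | [], total, _ => total
  | PvTok.num n :: rest, total, stack => pvEval rest total (stack ++ [n])
  | PvTok.op c :: rest, total, stack =>
      if stack = [] then pvEval rest total stack
      else pvEval rest (total + (if c = '+' then stack.sum else stack.foldl (· * ·) 1)) []

def worksheet_solver_part2_alt (columns : List String) : Int :=
  if columns = [] then 0
  else pvEval (columns.reverse.flatMap pvTokenizeCol) 0 []

-- ===== PRECONDITION & SPEC =====
def Spec_worksheet_solver_part2 (columns : List String) (out : Int) : Prop := out = worksheet_solver_part2_alt columns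
instance (columns : List String) (out : Int) : Decidable (Spec_worksheet_solver_part2 columns out) := by unfold Spec_worksheet_solver_part2; infer_instance

-- ===== CLAIM (what is proved, stated in full; the proofs are below) =====
def Claim_equal_worksheet_solver_part2 : Prop := ∀ (columns : List String), Dom_worksheet_solver_part2 columns → Spec_worksheet_solver_part2 columns (worksheet_solver_part2 columns)

-- ===== LEMMAS AND PROOFS =====
-- evaluating one column's tokens in front of any continuation = A's fused per-column step
lemma pv_key : ∀ (chars temp : List Char) (results stack : List Int) (rest : List PvTok),
    pvEval (pvTokChars chars temp ++ rest) results.sum stack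
      = pvEval rest (pvColA chars results stack temp).1.sum (pvColA chars results stack temp).2 := by
  intro chars
  induction chars with
  | nil =>
      intro temp results stack rest
      by_cases h : temp = [] <;> simp [pvTokChars, pvColA, pvEval, h]
  | cons ch rest' ih =>
      intro temp results stack rest
      by_cases hd : PySem.Chars.isdigit ch
      · simp [pvTokChars, pvColA, hd, ih]
      · by_cases hop : ch = '+' ∨ ch = '*'
        · by_cases ht : temp = []
          · by_cases hs : stack = []
            · simp [pvTokChars, pvColA, pvEval, hd, hop, ht, hs, ih]
            · have h2 := ih [] (results ++ [if ch = '+' then stack.sum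
                  else stack.foldl (· * ·) 1]) [] rest
              simp only [List.sum_append, List.sum_cons, List.sum_nil, add_zero] at h2
              simp [pvTokChars, pvColA, pvEval, hd, hop, ht, hs, h2]
          · have h2 := ih [] (results ++ [if ch = '+' then (stack ++ [pvIntOf temp]).sum
                else (stack ++ [pvIntOf temp]).foldl (· * ·) 1]) [] rest
            simp only [List.sum_append, List.sum_cons, List.sum_nil, add_zero,
              List.foldl_append, List.foldl_cons, List.foldl_nil] at h2
            simp [pvTokChars, pvColA, pvEval, hd, hop, ht, h2]
        · simp [pvTokChars, pvColA, hd, hop, ih]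

-- evaluating the whole token stream = A's outer loop
lemma pv_keyCols : ∀ (cols : List String) (results stack : List Int),
    pvEval (cols.flatMap pvTokenizeCol) results.sum stack = (pvColsA cols results stack).sum := by
  intro cols
  induction cols with
  | nil => intro results stack; simp [pvColsA, pvEval]
  | cons c cs ih =>
      intro results stack
      rw [List.flatMap_cons, pvTokenizeCol, pv_key]
      simp [pvColsA, ih]

-- ===== VERDICT (by name: the statement is the Claim_ definition above) =====
theorem worksheet_solver_part2_spec : Claim_equal_worksheet_solver_part2 := by
  intro columns _
  unfold Spec_worksheet_solver_part2 worksheet_solver_part2 worksheet_solver_part2_alt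
  by_cases h : columns = []
  · simp [h]
  · have := pv_keyCols columns.reverse [] []
    simpa [h] using this.symm
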